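-- pv_equiv track=rewrite | github.com/oriacib/automatic-paper-filter | app/md_parser.py | _pick_summary
-- ===== SOURCE A (Python) =====
-- def _pick_summary(block_lines: list[str]) -> str:
--     for line in block_lines:
--         stripped = line.strip()
--         if not stripped:
--             continue
--         lowered = stripped.lower()
--         if lowered.startswith("tl;dr:") or lowered.startswith("tl;dr：") or lowered.startswith("tldr:"):
--             if ":" in stripped:
--                 return stripped.split(":", 1)[1].strip()
--             if "：" in stripped:
--                 return stripped.split("：", 1)[1].strip()
--             return stripped
--
--     for line in block_lines:
--         stripped = line.strip()
--         if not stripped: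
--             continue
--         if stripped.startswith("<") or stripped.startswith("*"):
--             continue
--         if stripped.lower().startswith("main category:"):
--             continue
--         if stripped.lower().startswith("motivation:"):
--             continue
--         if stripped.lower().startswith("method:"):
--             continue
--         if stripped.lower().startswith("result:"):
--             continue
--         if stripped.lower().startswith("conclusion:"):
--             continue
--         if stripped.lower().startswith("abstract:"):
--             continue
--         return stripped[:500]
--     return ""
-- ===== SOURCE B (Python) =====
-- TLDR_PREFIXES = ("tl;dr:", "tl;dr\uff1a", "tldr:")
-- SKIP_PREFIXES = ("main category:", "motivation:", "method:", "result:", "conclusion:", "abstract:")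
--
--
-- def _pick_summary(block_lines: list[str]) -> str:
--     fallback = None
--     for line in block_lines:
--         stripped = line.strip()
--         if not stripped:
--             continue
--         lowered = stripped.lower()
--         if lowered.startswith(TLDR_PREFIXES):
--             if ":" in stripped:
--                 return stripped.split(":", 1)[1].strip()
--             if "\uff1a" in stripped:
--                 return stripped.split("\uff1a", 1)[1].strip()
--             return stripped
--         if fallback is None and not stripped.startswith(("<", "*")) and not lowered.startswith(SKIP_PREFIXES):
--             fallback = stripped[:500]
--     return fallback if fallback is not None else ""
-- ===== Notes on version B (the rewrite author's own statement) =====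
-- stated objective: simpler
-- what changed: Replaces A's two separate full scans (one for a TL;DR line, one re-stripping every line for a fallback) by a single pass that remembers the first eligible fallback line and still returns immediately on the first TL;DR line, so each line is stripped and tested once.
import Mathlib
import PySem

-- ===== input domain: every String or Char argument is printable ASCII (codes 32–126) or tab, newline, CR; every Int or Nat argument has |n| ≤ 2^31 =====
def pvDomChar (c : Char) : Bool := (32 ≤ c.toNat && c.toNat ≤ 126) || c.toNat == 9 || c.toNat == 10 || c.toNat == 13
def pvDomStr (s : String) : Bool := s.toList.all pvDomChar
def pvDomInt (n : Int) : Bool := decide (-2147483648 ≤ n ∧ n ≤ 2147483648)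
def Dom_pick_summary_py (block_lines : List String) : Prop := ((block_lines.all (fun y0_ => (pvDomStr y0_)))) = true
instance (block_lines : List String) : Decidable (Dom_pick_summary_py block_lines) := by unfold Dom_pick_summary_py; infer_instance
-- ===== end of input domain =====

-- B replaces A's two full scans by a single pass that remembers the first eligible
-- fallback line while still returning immediately on the first TL;DR line (objective: simpler).

-- ===== PORT A =====
-- A's first loop: returns some summary if a TL;DR line is found, none otherwise.
-- In the TL;DR branch Python's split(...,1)[1] cannot raise (the separator was just
-- tested with `in`), so the `.getD ""` default is unreachable.
def aTldrLoop : List String → Option String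
  | [] => none
  | line :: rest =>
    let stripped := PySem.Str.strip line
    if stripped = "" then aTldrLoop rest
    else
      let lowered := PySem.Str.lower stripped
      if PySem.Str.startswith lowered "tl;dr:" || PySem.Str.startswith lowered "tl;dr：" ||
          PySem.Str.startswith lowered "tldr:" then
        if PySem.Str.isIn ":" stripped then
          some (PySem.Str.strip (((PySem.Str.splitMax? stripped ":" 1).getD []).getD 1 ""))
        else if PySem.Str.isIn "：" stripped then
          some (PySem.Str.strip (((PySem.Str.splitMax? stripped "：" 1).getD []).getD 1 ""))
        else some stripped
      else aTldrLoop rest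

-- A's second loop: first non-empty line not starting with '<', '*' or a skipped "xxx:" prefix.
def aFallbackLoop : List String → String
  | [] => ""
  | line :: rest =>
    let stripped := PySem.Str.strip line
    if stripped = "" then aFallbackLoop rest
    else if PySem.Str.startswith stripped "<" || PySem.Str.startswith stripped "*" then
      aFallbackLoop rest
    else if PySem.Str.startswith (PySem.Str.lower stripped) "main category:" then aFallbackLoop rest
    else if PySem.Str.startswith (PySem.Str.lower stripped) "motivation:" then aFallbackLoop rest
    else if PySem.Str.startswith (PySem.Str.lower stripped) "method:" then aFallbackLoop rest
    else if PySem.Str.startswith (PySem.Str.lower stripped) "result:" then aFallbackLoop rest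
    else if PySem.Str.startswith (PySem.Str.lower stripped) "conclusion:" then aFallbackLoop rest
    else if PySem.Str.startswith (PySem.Str.lower stripped) "abstract:" then aFallbackLoop rest
    else PySem.Str.slice stripped none (some 500)

def pick_summary_py (block_lines : List String) : String :=
  match aTldrLoop block_lines with
  | some r => r
  | none => aFallbackLoop block_lines

-- ===== PORT B =====
-- Source B's single loop; fb is the `fallback` variable (none = Python's None).
-- Same unreachable-default remark for split(...,1)[1] as in port A.
def bLoop : List String → Option String → String
  | [], fb => fb.getD ""
  | line :: rest, fb =>
    let stripped := PySem.Str.strip line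
    if stripped = "" then bLoop rest fb
    else
      let lowered := PySem.Str.lower stripped
      if ["tl;dr:", "tl;dr：", "tldr:"].any (fun p => PySem.Str.startswith lowered p) then
        if PySem.Str.isIn ":" stripped then
          PySem.Str.strip (((PySem.Str.splitMax? stripped ":" 1).getD []).getD 1 "")
        else if PySem.Str.isIn "：" stripped then
          PySem.Str.strip (((PySem.Str.splitMax? stripped "：" 1).getD []).getD 1 "")
        else stripped
      else if fb.isNone && !(["<", "*"].any (fun p => PySem.Str.startswith stripped p)) &&
          !(["main category:", "motivation:", "method:", "result:", "conclusion:", "abstract:"].any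
            (fun p => PySem.Str.startswith lowered p)) then
        bLoop rest (some (PySem.Str.slice stripped none (some 500)))
      else bLoop rest fb

def pick_summary_py_alt (block_lines : List String) : String :=
  bLoop block_lines none

-- ===== PRECONDITION & SPEC =====
def Spec_pick_summary_py (block_lines : List String) (out : String) : Prop := out = pick_summary_py_alt block_lines
instance (block_lines : List String) (out : String) : Decidable (Spec_pick_summary_py block_lines out) := by unfold Spec_pick_summary_py; infer_instance

-- ===== CLAIM (what is proved, stated in full; the proofs are below) =====
def Claim_equal_pick_summary_py : Prop := ∀ (block_lines : List String), Dom_pick_summary_py block_lines → Spec_pick_summary_py block_lines (pick_summary_py block_lines)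

-- ===== LEMMAS AND PROOFS =====

-- A's TL;DR test, written as one boolean (the three-way `or` of port A).
def tldrCond (lowered : String) : Bool :=
  PySem.Str.startswith lowered "tl;dr:" || PySem.Str.startswith lowered "tl;dr：" ||
    PySem.Str.startswith lowered "tldr:"

-- A's skip test in the fallback loop, flattened into one boolean.
def skipCond (stripped : String) : Bool :=
  PySem.Str.startswith stripped "<" || PySem.Str.startswith stripped "*" ||
  PySem.Str.startswith (PySem.Str.lower stripped) "main category:" ||
  PySem.Str.startswith (PySem.Str.lower stripped) "motivation:" ||
  PySem.Str.startswith (PySem.Str.lower stripped) "method:" ||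
  PySem.Str.startswith (PySem.Str.lower stripped) "result:" ||
  PySem.Str.startswith (PySem.Str.lower stripped) "conclusion:" ||
  PySem.Str.startswith (PySem.Str.lower stripped) "abstract:"

-- The TL;DR-branch value both ports compute (their code there is identical).
def tldrVal (stripped : String) : String :=
  if PySem.Str.isIn ":" stripped then
    PySem.Str.strip (((PySem.Str.splitMax? stripped ":" 1).getD []).getD 1 "")
  else if PySem.Str.isIn "：" stripped then
    PySem.Str.strip (((PySem.Str.splitMax? stripped "：" 1).getD []).getD 1 "")
  else stripped

theorem aTldrLoop_cons (line : String) (rest : List String) :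
    aTldrLoop (line :: rest) =
      if PySem.Str.strip line = "" then aTldrLoop rest
      else if tldrCond (PySem.Str.lower (PySem.Str.strip line)) then
        some (tldrVal (PySem.Str.strip line))
      else aTldrLoop rest := by
  simp only [aTldrLoop, tldrCond, tldrVal]
  split_ifs <;> rfl

theorem aFallbackLoop_cons (line : String) (rest : List String) :
    aFallbackLoop (line :: rest) =
      if PySem.Str.strip line = "" then aFallbackLoop rest
      else if skipCond (PySem.Str.strip line) then aFallbackLoop rest
      else PySem.Str.slice (PySem.Str.strip line) none (some 500) := by
  simp only [aFallbackLoop, skipCond]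
  split_ifs <;> simp_all

theorem bLoop_cons (line : String) (rest : List String) (fb : Option String) :
    bLoop (line :: rest) fb =
      if PySem.Str.strip line = "" then bLoop rest fb
      else if tldrCond (PySem.Str.lower (PySem.Str.strip line)) then
        tldrVal (PySem.Str.strip line)
      else if fb.isNone && !skipCond (PySem.Str.strip line) then
        bLoop rest (some (PySem.Str.slice (PySem.Str.strip line) none (some 500)))
      else bLoop rest fb := by
  simp only [bLoop, tldrCond, tldrVal, skipCond, List.any_cons, List.any_nil,
    Bool.or_false, Bool.or_assoc, Bool.not_or, Bool.and_assoc]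

-- Once the fallback is set, B only looks for a TL;DR line; the stored fallback wins otherwise.
theorem bLoop_some (l : List String) (f : String) :
    bLoop l (some f) = (aTldrLoop l).getD f := by
  induction l with
  | nil => rfl
  | cons line rest ih =>
    rw [bLoop_cons, aTldrLoop_cons]
    split_ifs <;> simp_all

-- With no fallback yet, B computes A's TL;DR result if any, else A's fallback scan.
theorem bLoop_none (l : List String) :
    bLoop l none = (aTldrLoop l).getD (aFallbackLoop l) := by
  induction l with
  | nil => rfl
  | cons line rest ih =>
    rw [bLoop_cons, aTldrLoop_cons, aFallbackLoop_cons]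
    split_ifs <;> simp_all [bLoop_some]

-- ===== VERDICT (by name: the statement is the Claim_ definition above) =====
theorem pick_summary_py_spec : Claim_equal_pick_summary_py := by
  intro bl _
  unfold Spec_pick_summary_py pick_summary_py pick_summary_py_alt
  rw [bLoop_none]
  cases aTldrLoop bl <;> rfl
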